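-- pv_equiv track=rewrite | github.com/salvador0401/Algoritmos-de-ordenamiento | Natural_merging.py | merge_all_runs
-- ===== SOURCE A (Python) =====
-- def merge_two_runs(run1, run2):
--     merged_run = []  # Lista para almacenar la fusión de las dos sublistas
--     i = j = 0  # Índices para recorrer las sublistas run1 y run2
--     while i < len(run1) and j < len(run2):  # Mientras haya elementos en ambas sublistas
--         if run1[i][0] < run2[j][0] or (run1[i][0] == run2[j][0] and run1[i][1] <= run2[j][1]):  # Comparación de nombres y edades
--             merged_run.append(run1[i])  # Añadimos el elemento de run1
--             i += 1  # Pasamos al siguiente elemento en run1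
--         else:  # Si el elemento de run2 es menor
--             merged_run.append(run2[j])  # Añadimos el elemento de run2
--             j += 1  # Pasamos al siguiente elemento en run2
--     merged_run.extend(run1[i:])  # Añadimos los elementos restantes de run1
--     merged_run.extend(run2[j:])  # Añadimos los elementos restantes de run2
--     return merged_run  # Devolvemos la lista fusionada
--
-- def merge_all_runs(runs):
--     while len(runs) > 1:  # Mientras haya más de una sublista
--         new_runs = []  # Lista para almacenar las nuevas sublistas fusionadas
--         for i in range(0, len(runs), 2):  # Iteramos sobre las sublistas en pares
--             if i + 1 < len(runs):  # Si hay al menos dos sublistas para fusionar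
--                 new_runs.append(merge_two_runs(runs[i], runs[i + 1]))  # Fusionamos dos sublistas consecutivas
--             else:  # Si solo hay una sublista restante
--                 new_runs.append(runs[i])  # Añadimos la sublista tal cual
--         runs = new_runs  # Reemplazamos las sublistas originales por las nuevas sublistas fusionadas
--     return runs[0]  # Devolvemos la lista resultante de la fusión
-- ===== SOURCE B (Python) =====
-- def merge_two_runs(run1, run2):
--     merged_run = []
--     i = j = 0
--     while i < len(run1) and j < len(run2):
--         if run1[i][0] < run2[j][0] or (run1[i][0] == run2[j][0] and run1[i][1] <= run2[j][1]):
--             merged_run.append(run1[i])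
--             i += 1
--         else:
--             merged_run.append(run2[j])
--             j += 1
--     merged_run.extend(run1[i:])
--     merged_run.extend(run2[j:])
--     return merged_run
--
-- def merge_all_runs(runs):
--     result = runs[0]
--     for run in runs[1:]:
--         result = merge_two_runs(result, run)
--     return result
-- ===== Notes on version B (the rewrite author's own statement) =====
-- stated objective: simpler
-- what changed: Replaced the bottom-up rounds of pairwise merging (repeatedly building new_runs of half the size) with a single left-to-right fold that accumulates result = merge_two_runs(result, run) over the remaining runs; merge_two_runs is unchanged.
-- outside the precondition, e.g. on merge_all_runs([]): A raises IndexError, B raises IndexError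
import Mathlib
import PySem

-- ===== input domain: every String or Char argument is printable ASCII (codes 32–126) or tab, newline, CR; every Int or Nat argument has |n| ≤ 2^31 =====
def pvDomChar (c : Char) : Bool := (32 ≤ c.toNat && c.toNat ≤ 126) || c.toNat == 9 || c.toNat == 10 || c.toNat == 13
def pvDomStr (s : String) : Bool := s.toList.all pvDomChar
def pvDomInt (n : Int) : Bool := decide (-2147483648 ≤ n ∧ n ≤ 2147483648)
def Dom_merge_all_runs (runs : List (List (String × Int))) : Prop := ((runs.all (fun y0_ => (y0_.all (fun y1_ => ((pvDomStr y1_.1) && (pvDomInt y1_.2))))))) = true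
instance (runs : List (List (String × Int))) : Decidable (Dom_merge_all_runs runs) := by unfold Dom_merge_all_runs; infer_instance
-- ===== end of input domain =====

-- B replaces A's bottom-up rounds of pairwise merging with one left-to-right fold of the
-- same unchanged two-run merge (objective: simpler); return values agree on all nonempty inputs.

-- ===== PORT A =====
-- shared helper: literal transliteration of merge_two_runs (the two index cursors i, j
-- become structural recursion on the two unconsumed suffixes; the trailing extends are the
-- base cases); used verbatim by both Pythons.
def mergeTwoRuns : List (String × Int) → List (String × Int) → List (String × Int)
  | [], run2 => run2
  | x :: run1, [] => x :: run1
  | x :: run1, y :: run2 =>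
    if x.1 < y.1 ∨ (x.1 = y.1 ∧ x.2 ≤ y.2) then
      x :: mergeTwoRuns run1 (y :: run2)
    else
      y :: mergeTwoRuns (x :: run1) run2

-- one pass of A's inner for-loop over range(0, len(runs), 2)
def pairRound : List (List (String × Int)) → List (List (String × Int))
  | a :: b :: rest => mergeTwoRuns a b :: pairRound rest
  | [a] => [a]
  | [] => []

theorem pairRound_length (rs : List (List (String × Int))) :
    (pairRound rs).length = (rs.length + 1) / 2 := by
  fun_induction pairRound rs with
  | case1 a b rest ih => simp [ih]; omega
  | case2 a => simp
  | case3 => rfl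

-- A's outer while-loop
def mergeRounds (rs : List (List (String × Int))) : List (List (String × Int)) :=
  if 1 < rs.length then mergeRounds (pairRound rs) else rs
termination_by rs.length
decreasing_by
  rw [pairRound_length]; omega

-- on [] Python's runs[0] raises IndexError (excluded by Pre_); .headD [] stands for runs[0]
def merge_all_runs (runs : List (List (String × Int))) : List (String × Int) :=
  (mergeRounds runs).headD []

-- ===== PORT B =====
-- result = runs[0]; for run in runs[1:]: result = merge_two_runs(result, run)
-- (on [] Python B raises IndexError, excluded by Pre_)
def merge_all_runs_alt (runs : List (List (String × Int))) : List (String × Int) :=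
  match runs with
  | [] => []
  | r :: rest => rest.foldl mergeTwoRuns r

-- ===== PRECONDITION & SPEC =====
-- Pre_ excludes only the empty list, on which both Pythons raise IndexError (runs[0]).
def Pre_merge_all_runs (runs : List (List (String × Int))) : Prop := runs ≠ []
instance (runs : List (List (String × Int))) : Decidable (Pre_merge_all_runs runs) := by
  unfold Pre_merge_all_runs; infer_instance

def pvWitness_merge_all_runs : (List (List (String × Int))) := [[("a", 1)]]

def Spec_merge_all_runs (runs : List (List (String × Int))) (out : List (String × Int)) : Prop := out = merge_all_runs_alt runs
instance (runs : List (List (String × Int))) (out : List (String × Int)) : Decidable (Spec_merge_all_runs runs out) := by unfold Spec_merge_all_runs; infer_instance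

-- ===== CLAIM (what is proved, stated in full; the proofs are below) =====
def Claim_equal_merge_all_runs : Prop := ∀ (runs : List (List (String × Int))), Dom_merge_all_runs runs → Pre_merge_all_runs runs → Spec_merge_all_runs runs (merge_all_runs runs)

-- ===== LEMMAS AND PROOFS =====

-- the comparison both programs merge by: lexicographic ≤ on (name, age), written out
theorem keyLE_total (x y : String × Int)
    (h : ¬ (x.1 < y.1 ∨ (x.1 = y.1 ∧ x.2 ≤ y.2))) :
    y.1 < x.1 ∨ (y.1 = x.1 ∧ y.2 ≤ x.2) := by
  rcases lt_trichotomy x.1 y.1 with h1 | h1 | h1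
  · exact absurd (Or.inl h1) h
  · refine Or.inr ⟨h1.symm, ?_⟩
    by_contra h2
    exact h (Or.inr ⟨h1, by omega⟩)
  · exact Or.inl h1

theorem keyLE_trans (x y z : String × Int)
    (hxy : x.1 < y.1 ∨ (x.1 = y.1 ∧ x.2 ≤ y.2))
    (hyz : y.1 < z.1 ∨ (y.1 = z.1 ∧ y.2 ≤ z.2)) :
    x.1 < z.1 ∨ (x.1 = z.1 ∧ x.2 ≤ z.2) := by
  rcases hxy with h1 | ⟨h1, h1'⟩ <;> rcases hyz with h2 | ⟨h2, h2'⟩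
  · exact Or.inl (lt_trans h1 h2)
  · exact Or.inl (h2 ▸ h1)
  · exact Or.inl (h1 ▸ h2)
  · exact Or.inr ⟨h1.trans h2, le_trans h1' h2'⟩

theorem mergeTwoRuns_nil_left (ys : List (String × Int)) : mergeTwoRuns [] ys = ys := by
  simp [mergeTwoRuns]

theorem mergeTwoRuns_nil_right (xs : List (String × Int)) : mergeTwoRuns xs [] = xs := by
  cases xs <;> simp [mergeTwoRuns]

theorem mergeTwoRuns_cons_cons (x y : String × Int) (xs ys : List (String × Int)) :
    mergeTwoRuns (x :: xs) (y :: ys) =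
      if x.1 < y.1 ∨ (x.1 = y.1 ∧ x.2 ≤ y.2) then x :: mergeTwoRuns xs (y :: ys)
      else y :: mergeTwoRuns (x :: xs) ys := by
  simp only [mergeTwoRuns]

theorem mergeTwoRuns_assoc (as bs cs : List (String × Int)) :
    mergeTwoRuns (mergeTwoRuns as bs) cs = mergeTwoRuns as (mergeTwoRuns bs cs) := by
  match as, bs, cs with
  | [], bs, cs => rw [mergeTwoRuns_nil_left, mergeTwoRuns_nil_left]
  | a :: as, [], cs => rw [mergeTwoRuns_nil_right, mergeTwoRuns_nil_left]
  | a :: as, b :: bs, [] => rw [mergeTwoRuns_nil_right, mergeTwoRuns_nil_right]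
  | a :: as, b :: bs, c :: cs =>
    rw [mergeTwoRuns_cons_cons a b as bs]
    by_cases hab : (a.1 < b.1 ∨ (a.1 = b.1 ∧ a.2 ≤ b.2))
    · rw [if_pos hab]
      by_cases hac : (a.1 < c.1 ∨ (a.1 = c.1 ∧ a.2 ≤ c.2))
      · rw [mergeTwoRuns_cons_cons a c (mergeTwoRuns as (b :: bs)) cs, if_pos hac,
          mergeTwoRuns_assoc as (b :: bs) (c :: cs)]
        by_cases hbc : (b.1 < c.1 ∨ (b.1 = c.1 ∧ b.2 ≤ c.2))
        · rw [mergeTwoRuns_cons_cons b c bs cs, if_pos hbc,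
            mergeTwoRuns_cons_cons a b as (mergeTwoRuns bs (c :: cs)), if_pos hab]
        · rw [mergeTwoRuns_cons_cons b c bs cs, if_neg hbc,
            mergeTwoRuns_cons_cons a c as (mergeTwoRuns (b :: bs) cs), if_pos hac]
      · have hbc : ¬ (b.1 < c.1 ∨ (b.1 = c.1 ∧ b.2 ≤ c.2)) := fun h => hac (keyLE_trans a b c hab h)
        rw [mergeTwoRuns_cons_cons a c (mergeTwoRuns as (b :: bs)) cs, if_neg hac]
        have h1 : a :: mergeTwoRuns as (b :: bs) = mergeTwoRuns (a :: as) (b :: bs) := by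
          rw [mergeTwoRuns_cons_cons a b as bs, if_pos hab]
        rw [h1, mergeTwoRuns_assoc (a :: as) (b :: bs) cs,
          mergeTwoRuns_cons_cons b c bs cs, if_neg hbc,
          mergeTwoRuns_cons_cons a c as (mergeTwoRuns (b :: bs) cs), if_neg hac]
    · rw [if_neg hab]
      have hba : (b.1 < a.1 ∨ (b.1 = a.1 ∧ b.2 ≤ a.2)) := keyLE_total a b hab
      by_cases hbc : (b.1 < c.1 ∨ (b.1 = c.1 ∧ b.2 ≤ c.2))
      · rw [mergeTwoRuns_cons_cons b c (mergeTwoRuns (a :: as) bs) cs, if_pos hbc,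
          mergeTwoRuns_assoc (a :: as) bs (c :: cs),
          mergeTwoRuns_cons_cons b c bs cs, if_pos hbc,
          mergeTwoRuns_cons_cons a b as (mergeTwoRuns bs (c :: cs)), if_neg hab]
      · have hac : ¬ (a.1 < c.1 ∨ (a.1 = c.1 ∧ a.2 ≤ c.2)) := fun h => hbc (keyLE_trans b a c hba h)
        rw [mergeTwoRuns_cons_cons b c (mergeTwoRuns (a :: as) bs) cs, if_neg hbc]
        have h1 : b :: mergeTwoRuns (a :: as) bs = mergeTwoRuns (a :: as) (b :: bs) := by
          rw [mergeTwoRuns_cons_cons a b as bs, if_neg hab]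
        rw [h1, mergeTwoRuns_assoc (a :: as) (b :: bs) cs,
          mergeTwoRuns_cons_cons b c bs cs, if_neg hbc,
          mergeTwoRuns_cons_cons a c as (mergeTwoRuns (b :: bs) cs), if_neg hac]
termination_by as.length + bs.length + cs.length
decreasing_by all_goals simp

theorem foldl_pairRound (rs : List (List (String × Int))) :
    ∀ acc, List.foldl mergeTwoRuns acc (pairRound rs) = List.foldl mergeTwoRuns acc rs := by
  fun_induction pairRound rs with
  | case1 a b rest ih =>
    intro acc
    simp only [List.foldl_cons, ih, mergeTwoRuns_assoc]
  | case2 a => intro acc; rfl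
  | case3 => intro acc; rfl

-- B's fold written on an arbitrary (possibly empty) list, for the induction
def foldFirst : List (List (String × Int)) → List (String × Int)
  | [] => []
  | r :: rest => rest.foldl mergeTwoRuns r

theorem foldFirst_pairRound (rs : List (List (String × Int))) (h : rs ≠ []) :
    foldFirst (pairRound rs) = foldFirst rs := by
  match rs with
  | [a] => simp [pairRound]
  | a :: b :: t =>
    rw [show pairRound (a :: b :: t) = mergeTwoRuns a b :: pairRound t from by simp [pairRound]]
    simp only [foldFirst, List.foldl_cons]
    rw [foldl_pairRound]

theorem mergeRounds_eq (rs : List (List (String × Int))) (h : rs ≠ []) :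
    mergeRounds rs = [foldFirst rs] := by
  rw [mergeRounds]
  by_cases hl : 1 < rs.length
  · rw [if_pos hl]
    have hne : pairRound rs ≠ [] := by
      have hlen := pairRound_length rs
      intro he; rw [he] at hlen; simp at hlen; omega
    rw [mergeRounds_eq (pairRound rs) hne, foldFirst_pairRound rs h]
  · rw [if_neg hl]
    match rs, h with
    | [a], _ => simp [foldFirst]
    | a :: b :: t, _ => simp at hl
termination_by rs.length
decreasing_by rw [pairRound_length]; omega

-- ===== VERDICT (by name: the statement is the Claim_ definition above) =====
theorem merge_all_runs_spec : Claim_equal_merge_all_runs := by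
  intro runs _ hpre
  unfold Spec_merge_all_runs merge_all_runs
  rw [mergeRounds_eq runs hpre]
  match runs, hpre with
  | r :: rest, _ => simp [foldFirst, merge_all_runs_alt]
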